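-- pv_equiv track=rewrite | github.com/annisaashif/ocr-document-mapping | parse_5col.py | move_section_key_after
-- ===== SOURCE A (Python) =====
-- def move_section_key_after(out: dict, key: str, after_key: str) -> dict:
--     """
--     Pindahkan posisi key di out["section"] supaya tepat setelah after_key,
--     tanpa mengubah urutan key lainnya.
--     """
--     sec = out.get("section")
--     if not isinstance(sec, dict):
--         return out
--     if key not in sec or after_key not in sec:
--         return out
--     if key == after_key:
--         return out
--
--     new_sec = {}
--     for k, v in sec.items():
--         if k == key:
--             continue  # skip dulu
--         new_sec[k] = v
--         if k == after_key:
--             new_sec[key] = sec[key]  # sisipkan tepat setelah after_key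
--
--     # jaga-jaga kalau after_key tidak ketemu (harusnya tidak terjadi)
--     if key not in new_sec:
--         new_sec[key] = sec[key]
--
--     out["section"] = new_sec
--     return out
-- ===== SOURCE B (Python) =====
-- def move_section_key_after(out: dict, key: str, after_key: str) -> dict:
--     """Move key in out["section"] so it sits right after after_key; other keys keep order."""
--     sec = out.get("section")
--     if not isinstance(sec, dict):
--         return out
--     ks = list(sec)
--     if key not in ks or after_key not in ks or key == after_key:
--         return out
--     cut = ks.index(after_key) + 1          # split point: right after the anchor
--     pairs = list(sec.items())
--     head = [p for p in pairs[:cut] if p[0] != key]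
--     tail = [p for p in pairs[cut:] if p[0] != key]
--     out["section"] = dict(head + [(key, sec[key])] + tail)
--     return out
-- ===== Notes on version B (the rewrite author's own statement) =====
-- stated objective: alternative
-- what changed: B replaces A's single conditional-insert dict-building loop (skip key, re-insert it on the fly after after_key, plus a trailing safety re-insert) by an index computation: it locates after_key in the key list, cuts the item list at that point, filters key out of each half and rebuilds the dict as head + [(key, sec[key])] + tail in one dict() call.
import Mathlib
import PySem

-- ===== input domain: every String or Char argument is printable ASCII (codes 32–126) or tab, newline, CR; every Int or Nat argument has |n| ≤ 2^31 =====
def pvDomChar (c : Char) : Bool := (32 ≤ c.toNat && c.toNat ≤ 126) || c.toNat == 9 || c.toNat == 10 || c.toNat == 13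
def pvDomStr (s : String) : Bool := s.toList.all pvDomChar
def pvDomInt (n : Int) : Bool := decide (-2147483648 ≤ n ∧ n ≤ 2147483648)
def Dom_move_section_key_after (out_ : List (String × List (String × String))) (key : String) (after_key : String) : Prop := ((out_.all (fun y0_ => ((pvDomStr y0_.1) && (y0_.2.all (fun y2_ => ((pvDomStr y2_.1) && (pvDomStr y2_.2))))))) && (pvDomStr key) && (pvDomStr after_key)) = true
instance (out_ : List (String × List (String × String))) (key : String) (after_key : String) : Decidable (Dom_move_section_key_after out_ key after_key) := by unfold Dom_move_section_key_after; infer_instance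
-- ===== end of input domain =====

-- B replaces A's conditional-insert dict-building loop by an index computation: cut the item
-- list right after after_key's position, filter key out of each half, and rebuild the dict as
-- head ++ [(key, sec[key])] ++ tail (objective: alternative).
-- Both Pythons mutate out (out["section"] = …) identically; the theorems are about the return value.

-- ===== PORT A =====
-- sec[key] is guarded by 'key in sec', so getD with a dummy default is exact here.
def move_section_key_after (out_ : List (String × List (String × String))) (key : String) (after_key : String) : List (String × List (String × String)) :=
  let outd : PySem.Dict String (List (String × String)) := PySem.Dict.mk out_
  match outd.get? "section" with
  | none => out_            -- sec is None: 'not isinstance(sec, dict)' → return out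
  | some sec =>
    let secd : PySem.Dict String String := PySem.Dict.mk sec
    if !secd.contains key || !secd.contains after_key then out_
    else if key == after_key then out_
    else
      let new_sec := sec.foldl (fun (ns : PySem.Dict String String) p =>
        if p.1 == key then ns                  -- continue: skip dulu
        else
          let ns := ns.insert p.1 p.2
          if p.1 == after_key then ns.insert key (secd.getD key "") else ns)
        PySem.Dict.empty
      let new_sec := if !new_sec.contains key then new_sec.insert key (secd.getD key "") else new_sec
      (outd.insert "section" new_sec.items).items

-- ===== PORT B =====
def move_section_key_after_alt (out_ : List (String × List (String × String))) (key : String) (after_key : String) : List (String × List (String × String)) :=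
  match (PySem.Dict.mk out_).get? "section" with
  | none => out_
  | some sec =>
    let ks := sec.map Prod.fst                                 -- ks = list(sec): the keys in order
    if !ks.contains key || !ks.contains after_key || key == after_key then out_
    else
      let cut := (PySem.List.index? ks after_key).getD 0 + 1   -- ks.index(after_key) never raises here: after_key ∈ ks
      let head := (sec.take cut).filter (fun p => p.1 != key)  -- pairs[:cut], 0 ≤ cut so slicing is take/drop
      let tail := (sec.drop cut).filter (fun p => p.1 != key)
      let moved := head ++ [(key, (PySem.Dict.mk sec).getD key "")] ++ tail
      ((PySem.Dict.mk out_).insert "section" (PySem.Dict.ofList moved).items).items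

-- ===== PRECONDITION & SPEC =====
def Spec_move_section_key_after (out_ : List (String × List (String × String))) (key : String) (after_key : String) (out : List (String × List (String × String))) : Prop := out = move_section_key_after_alt out_ key after_key
instance (out_ : List (String × List (String × String))) (key : String) (after_key : String) (out : List (String × List (String × String))) : Decidable (Spec_move_section_key_after out_ key after_key out) := by unfold Spec_move_section_key_after; infer_instance

-- ===== CLAIM (what is proved, stated in full; the proofs are below) =====
def Claim_equal_move_section_key_after : Prop := ∀ (out_ : List (String × List (String × String))) (key : String) (after_key : String), Dom_move_section_key_after out_ key after_key → Spec_move_section_key_after out_ key after_key (move_section_key_after out_ key after_key)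

-- ===== LEMMAS AND PROOFS =====

-- A's loop body, abstracted over the moved key, the anchor key and the moved value.
def pvAstep (key ak kv : String) (ns : PySem.Dict String String) (p : String × String) : PySem.Dict String String :=
  if p.1 == key then ns
  else
    let ns := ns.insert p.1 p.2
    if p.1 == ak then ns.insert key kv else ns

-- the list of inserts A's loop performs
def pvExpand (key ak kv : String) (l : List (String × String)) : List (String × String) :=
  l.flatMap (fun p => if p.1 == key then [] else if p.1 == ak then [p, (key, kv)] else [p])

def pvIns (d : PySem.Dict String String) (p : String × String) : PySem.Dict String String :=
  d.insert p.1 p.2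

lemma pvL1 (key ak kv : String) (l : List (String × String)) (d : PySem.Dict String String) :
    l.foldl (pvAstep key ak kv) d = (pvExpand key ak kv l).foldl pvIns d := by
  induction l generalizing d with
  | nil => rfl
  | cons p t ih =>
    rw [List.foldl_cons,
      show pvExpand key ak kv (p :: t)
          = (if p.1 == key then [] else if p.1 == ak then [p, (key, kv)] else [p])
            ++ pvExpand key ak kv t from rfl,
      List.foldl_append, ih]
    congr 1
    by_cases h1 : p.1 == key
    · simp [pvAstep, h1]
    · by_cases h2 : p.1 == ak <;> simp [pvAstep, pvIns, h1, h2]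

lemma pvL0 (key ak kv : String) (l : List (String × String)) :
    pvExpand key ak kv l =
      (l.filter (fun p => p.1 != key)).flatMap (fun p => if p.1 == ak then [p, (key, kv)] else [p]) := by
  induction l with
  | nil => rfl
  | cons p t ih =>
    rw [show pvExpand key ak kv (p :: t)
          = (if p.1 == key then [] else if p.1 == ak then [p, (key, kv)] else [p])
            ++ pvExpand key ak kv t from rfl, ih]
    by_cases h1 : p.1 == key
    · have h1' : p.1 = key := by simpa using h1
      simp [h1']
    · have h1' : ¬ p.1 = key := by simpa using h1
      simp [h1']

lemma pvMapReplace (k v : String) (l : List (String × String)) (hnd : (l.map Prod.fst).Nodup)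
    (hf : l.find? (fun p => p.1 == k) = some (k, v)) :
    l.map (fun p => if p.1 == k then (k, v) else p) = l := by
  induction l with
  | nil => simp at hf
  | cons q t ih =>
    simp only [List.map_cons, List.nodup_cons] at hnd
    rw [List.find?_cons] at hf
    by_cases hq : q.1 == k
    · rw [hq] at hf; simp only [] at hf
      have hqe : q = (k, v) := Option.some.inj hf
      subst hqe
      rw [List.map_cons, if_pos hq]
      congr 1
      have hnk : ∀ p ∈ t, ¬ (p.1 == k) := by
        intro p hp hc
        have hpk : p.1 = k := by simpa using hc
        have hm : p.1 ∈ t.map Prod.fst := List.mem_map_of_mem hp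
        exact hnd.1 (hpk ▸ hm)
      calc t.map (fun p => if p.1 == k then (k, v) else p) = t.map id := by
            apply List.map_congr_left; intro p hp; simp [hnk p hp]
        _ = t := List.map_id t
    · rw [show (q.1 == k) = false by simpa using hq] at hf; simp only [] at hf
      rw [List.map_cons, if_neg hq]
      rw [ih hnd.2 hf]

lemma pvInsertNoop (d : PySem.Dict String String) (k v : String)
    (hnd : d.keys.Nodup) (hg : d.get? k = some v) : d.insert k v = d := by
  have hc : d.contains k = true := by rw [PySem.Dict.contains_eq_isSome_get?, hg]; rfl
  apply PySem.Dict.ext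
  rw [PySem.Dict.items_insert_of_contains d v hc]
  have hf : d.items.find? (fun p => p.1 == k) = some (k, v) := by
    simp only [PySem.Dict.get?] at hg
    rcases ho : d.items.find? (fun p => p.1 == k) with _ | q
    · simp [ho] at hg
    · have h1 := List.find?_some ho
      have h2 : q.2 = v := by simp [ho] at hg; exact hg
      have h3 : q.1 = k := by simpa using h1
      rw [ho]; congr 1; exact Prod.ext h3 h2
  exact pvMapReplace k v d.items hnd hf

lemma pvL3 (key ak kv : String) (t : List (String × String))
    (d : PySem.Dict String String) (hnd : d.keys.Nodup) (hg : d.get? key = some kv)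
    (hk : ∀ p ∈ t, p.1 ≠ key) :
    (t.flatMap (fun p => if p.1 == ak then [p, (key, kv)] else [p])).foldl pvIns d
      = t.foldl pvIns d := by
  induction t generalizing d with
  | nil => rfl
  | cons p t ih =>
    have hpk : p.1 ≠ key := hk p (List.mem_cons_self)
    have hnd' : (d.insert p.1 p.2).keys.Nodup := PySem.Dict.nodup_keys_insert d p.1 p.2 hnd
    have hg' : (d.insert p.1 p.2).get? key = some kv := by
      rw [PySem.Dict.get?_insert_of_ne d p.2 (Ne.symm (Ne.symm hpk).symm)]; exact hg
    by_cases h2 : p.1 == ak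
    · simp only [List.flatMap_cons, h2, if_pos, List.cons_append, List.foldl_cons]
      have hstep : pvIns (pvIns d p) (key, kv) = pvIns d p := by
        simpa [pvIns] using pvInsertNoop (d.insert p.1 p.2) key kv hnd' hg'
      rw [hstep]
      exact ih (d.insert p.1 p.2) hnd' hg' (fun q hq => hk q (List.mem_cons_of_mem p hq))
    · simp only [List.flatMap_cons, h2, if_neg, Bool.false_eq_true, not_false_iff,
        List.singleton_append, List.foldl_cons]
      exact ih (d.insert p.1 p.2) hnd' hg' (fun q hq => hk q (List.mem_cons_of_mem p hq))

lemma pvL4 (key ak kv : String) (itms : List (String × String))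
    (d : PySem.Dict String String) (hnd : d.keys.Nodup)
    (hk : ∀ p ∈ itms, p.1 ≠ key) (hex : ∃ p ∈ itms, p.1 = ak) :
    (itms.flatMap (fun p => if p.1 == ak then [p, (key, kv)] else [p])).foldl pvIns d
      = (itms.take (itms.findIdx (fun p => p.1 == ak) + 1) ++ [(key, kv)]
          ++ itms.drop (itms.findIdx (fun p => p.1 == ak) + 1)).foldl pvIns d := by
  induction itms generalizing d with
  | nil => simp at hex
  | cons p t ih =>
    by_cases h2 : p.1 == ak
    · have hfi : (p :: t).findIdx (fun p => p.1 == ak) = 0 := by simp [List.findIdx_cons, h2]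
      rw [hfi]
      simp only [List.flatMap_cons, h2, if_pos, List.take_succ_cons, List.take_zero,
        List.drop_succ_cons, List.drop_zero, List.cons_append, List.nil_append,
        List.foldl_cons]
      have hnd' : ((pvIns d p).insert key kv).keys.Nodup :=
        PySem.Dict.nodup_keys_insert _ key kv (PySem.Dict.nodup_keys_insert d p.1 p.2 hnd)
      have hg' : ((pvIns d p).insert key kv).get? key = some kv :=
        PySem.Dict.get?_insert_self _ key kv
      exact pvL3 key ak kv t _ hnd' hg' (fun q hq => hk q (List.mem_cons_of_mem p hq))
    · have hfi : (p :: t).findIdx (fun p => p.1 == ak) = t.findIdx (fun p => p.1 == ak) + 1 := by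
        simp [List.findIdx_cons, h2]
      rw [hfi]
      have hex' : ∃ q ∈ t, q.1 = ak := by
        rcases hex with ⟨q, hq, hqe⟩
        rcases List.mem_cons.mp hq with h | h
        · exfalso; apply h2; subst h; simpa using hqe
        · exact ⟨q, h, hqe⟩
      simp only [List.flatMap_cons, h2, if_neg, Bool.false_eq_true, not_false_iff,
        List.take_succ_cons, List.drop_succ_cons, List.cons_append, List.foldl_cons]
      exact ih _ (PySem.Dict.nodup_keys_insert d p.1 p.2 hnd)
        (fun q hq => hk q (List.mem_cons_of_mem p hq)) hex'

-- keys of (Dict.mk l)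
lemma pvKeysMk (l : List (String × String)) : (PySem.Dict.mk l).keys = l.map Prod.fst := by
  simp [PySem.Dict.keys]

-- membership in a dict built from l = membership in l's key list
lemma pvContainsMk (l : List (String × String)) (x : String) :
    (PySem.Dict.mk l).contains x = (l.map Prod.fst).contains x := by
  rw [Bool.eq_iff_iff]
  simp

-- the moved key ends up in A's new_sec, so A's trailing safety branch never fires
lemma pvContainsKey (key kv : String) (L : List (String × String)) (hm : (key, kv) ∈ L) :
    ((L.foldl pvIns PySem.Dict.empty).contains key) = true := by
  rw [PySem.Dict.contains_iff_mem_keys,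
    show List.foldl pvIns (PySem.Dict.empty : PySem.Dict String String) L
        = List.foldl (fun (d : PySem.Dict String String) (p : String × String) =>
            d.insert (Prod.fst p)
              ((fun (_ : PySem.Dict String String) (q : String × String) => q.2) d p))
            PySem.Dict.empty L from rfl,
    PySem.Dict.keys_foldl_insert_key, PySem.Dict.keys_empty,
    PySem.Set.update_nil_left, PySem.Set.mem_ofList]
  exact List.mem_map.mpr ⟨(key, kv), hm, rfl⟩

-- B's cut commutes with filtering key out: splitting the filtered list right after the first
-- anchor equals filtering the two raw halves cut at the anchor's raw index.
lemma pvCutEq (key ak : String) (hne : key ≠ ak) :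
    ∀ (l : List (String × String)), ak ∈ l.map Prod.fst →
    ((l.filter (fun p => p.1 != key)).take
        ((l.filter (fun p => p.1 != key)).findIdx (fun p => p.1 == ak) + 1)
       = (l.take ((PySem.List.index? (l.map Prod.fst) ak).getD 0 + 1)).filter (fun p => p.1 != key))
    ∧ ((l.filter (fun p => p.1 != key)).drop
        ((l.filter (fun p => p.1 != key)).findIdx (fun p => p.1 == ak) + 1)
       = (l.drop ((PySem.List.index? (l.map Prod.fst) ak).getD 0 + 1)).filter (fun p => p.1 != key)) := by
  intro l
  induction l with
  | nil => intro h; simp at h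
  | cons p t ih =>
    intro hex
    by_cases hpa : p.1 = ak
    · have hkeep : (p.1 != key) = true := by simp [hpa, Ne.symm hne]
      have hba : (p.1 == ak) = true := by simp [hpa]
      rw [show ((p :: t).map Prod.fst) = p.1 :: t.map Prod.fst from rfl, hpa,
        PySem.List.index?_cons_self]
      constructor
      · simp [hkeep, List.findIdx_cons, hba]
      · simp [hkeep, List.findIdx_cons, hba]
    · have hex' : ak ∈ t.map Prod.fst := by
        rcases List.mem_cons.mp hex with h | h
        · exact absurd h.symm hpa
        · exact h
      obtain ⟨m, hm⟩ : ∃ m, PySem.List.index? (t.map Prod.fst) ak = some m :=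
        Option.isSome_iff_exists.mp
          ((PySem.List.index?_isSome_iff (t.map Prod.fst) ak).mpr hex')
      have hgd : (PySem.List.index? ((p :: t).map Prod.fst) ak).getD 0 = m + 1 := by
        rw [show ((p :: t).map Prod.fst) = p.1 :: t.map Prod.fst from rfl,
          PySem.List.index?_cons_of_ne _ hpa, hm]
        rfl
      obtain ⟨ih1, ih2⟩ := ih hex'
      rw [hm] at ih1 ih2
      simp only [Option.getD_some] at ih1 ih2
      rw [hgd]
      by_cases hpk : p.1 = key
      · have hdropp : (p.1 != key) = false := by simp [hpk]
        constructor
        · simp [hdropp, List.take_succ_cons, ih1]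
        · simp [hdropp, List.drop_succ_cons, ih2]
      · have hkeep : (p.1 != key) = true := by simp [hpk]
        have hfa : (p.1 == ak) = false := by simp [hpa]
        constructor
        · simp [hkeep, List.findIdx_cons, hfa, List.take_succ_cons, ih1]
        · simp [hkeep, List.findIdx_cons, hfa, List.drop_succ_cons, ih2]

-- ===== VERDICT (by name: the statement is the Claim_ definition above) =====
theorem move_section_key_after_spec : Claim_equal_move_section_key_after := by
  intro out_ key ak _
  unfold Spec_move_section_key_after move_section_key_after move_section_key_after_alt
  dsimp only
  cases hsec : (PySem.Dict.mk out_).get? "section" with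
  | none => rfl
  | some sec =>
    simp only []
    by_cases h1 : (PySem.Dict.mk sec).contains key
    · by_cases h2 : (PySem.Dict.mk sec).contains ak
      · by_cases h3 : key == ak
        · simp [h3]
        · have h1' := (pvContainsMk sec key).symm.trans h1
          have h2' := (pvContainsMk sec ak).symm.trans h2
          simp only [h1, h2, h3, h1', h2', Bool.not_true, Bool.or_false,
            if_neg, Bool.false_eq_true, not_false_iff]
          -- the interesting branch
          have hne : key ≠ ak := by simpa using h3
          have hakm : ak ∈ sec.map Prod.fst := by
            have hmem : ak ∈ (PySem.Dict.mk sec).keys :=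
              (PySem.Dict.contains_iff_mem_keys _ ak).mp h2
            rwa [pvKeysMk] at hmem
          have hex : ∃ p ∈ sec.filter (fun p => p.1 != key), p.1 = ak := by
            rcases List.mem_map.mp hakm with ⟨p, hp, hpe⟩
            exact ⟨p, List.mem_filter.mpr ⟨hp, by simp [hpe, Ne.symm hne]⟩, hpe⟩
          have hkf : ∀ p ∈ sec.filter (fun p => p.1 != key), p.1 ≠ key := by
            intro p hp
            have := (List.mem_filter.mp hp).2
            simpa using this
          set kv := (PySem.Dict.mk sec).getD key "" with hkv
          have hfold : sec.foldl (pvAstep key ak kv) PySem.Dict.empty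
              = ((sec.filter (fun p => p.1 != key)).take
                    ((sec.filter (fun p => p.1 != key)).findIdx (fun p => p.1 == ak) + 1)
                  ++ [(key, kv)]
                  ++ (sec.filter (fun p => p.1 != key)).drop
                    ((sec.filter (fun p => p.1 != key)).findIdx (fun p => p.1 == ak) + 1)).foldl
                  pvIns PySem.Dict.empty := by
            rw [pvL1, pvL0]
            exact pvL4 key ak kv _ _ (by simp) hkf hex
          have hstep : (fun (ns : PySem.Dict String String) (p : String × String) =>
              if p.1 == key then ns
              else
                let ns := ns.insert p.1 p.2
                if p.1 == ak then ns.insert key kv else ns) = pvAstep key ak kv := rfl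
          rw [hstep, hfold]
          have hcont := pvContainsKey key kv
            ((sec.filter (fun p => p.1 != key)).take
                ((sec.filter (fun p => p.1 != key)).findIdx (fun p => p.1 == ak) + 1)
              ++ [(key, kv)]
              ++ (sec.filter (fun p => p.1 != key)).drop
                ((sec.filter (fun p => p.1 != key)).findIdx (fun p => p.1 == ak) + 1))
            (by simp)
          rw [hcont]
          simp only [Bool.not_true, Bool.false_eq_true, if_neg, not_false_iff]
          -- relate the fold's splice to B's cut of the raw list
          have hcut := pvCutEq key ak hne sec hakm
          rw [hcut.1, hcut.2]
          rfl
      · have h2b : ({ items := sec } : PySem.Dict String String).contains ak = false :=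
          Bool.eq_false_iff.mpr h2
        have h2f : ((sec.map Prod.fst).contains ak) = false := (pvContainsMk sec ak).symm.trans h2b
        simp only [h2b, h2f, Bool.not_false, Bool.true_or, Bool.or_true, if_true]
    · have h1b : ({ items := sec } : PySem.Dict String String).contains key = false :=
        Bool.eq_false_iff.mpr h1
      have h1f : ((sec.map Prod.fst).contains key) = false := (pvContainsMk sec key).symm.trans h1b
      simp only [h1b, h1f, Bool.not_false, Bool.true_or, if_true]
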